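-- pv_equiv track=rewrite | github.com/Shaked-Aglamaz/ISO | code/new_iso/mult_chan.py | _split_segment_around_bads
-- ===== SOURCE A (Python) =====
-- def _split_segment_around_bads(sleep_start, sleep_end, bad_segments):
--     """
--     Split a sleep segment around BAD annotations, extracting clean parts.
--
--     Example:
--         Sleep: [0, 600]
--         BAD: [200, 250], [400, 450]
--         Result: [(0, 200), (250, 400), (450, 600)]
--     """
--     if len(bad_segments) == 0:
--         return [(sleep_start, sleep_end)]
--
--     # Find BAD segments that overlap with this sleep period
--     overlapping_bads = []
--     for bad_start, bad_end in bad_segments: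
--         # Check if there's any overlap
--         if not (bad_end <= sleep_start or bad_start >= sleep_end):
--             overlapping_bads.append((bad_start, bad_end))
--
--     if len(overlapping_bads) == 0:
--         return [(sleep_start, sleep_end)]
--
--     # Sort BAD segments by start time
--     overlapping_bads = sorted(overlapping_bads, key=lambda x: x[0])
--
--     # Extract valid segments between BAD periods
--     valid_segments = []
--     current_pos = sleep_start
--
--     for bad_start, bad_end in overlapping_bads:
--         # Add the clean segment before this BAD annotation
--         if current_pos < bad_start:
--             valid_segments.append((current_pos, bad_start))
--         # Move past the BAD segment
--         current_pos = max(current_pos, bad_end)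
--
--     # Add remaining segment after the last BAD annotation
--     if current_pos < sleep_end:
--         valid_segments.append((current_pos, sleep_end))
--
--     return valid_segments
-- ===== SOURCE B (Python) =====
-- def _split_segment_around_bads(sleep_start, sleep_end, bad_segments):
--     """Two-pass version: merge the overlapping BAD intervals into a disjoint
--     sorted list, then emit the complement within [sleep_start, sleep_end]."""
--     if len(bad_segments) == 0:
--         return [(sleep_start, sleep_end)]
--
--     overlapping = [(s, e) for s, e in bad_segments
--                    if not (e <= sleep_start or s >= sleep_end)]
--     if len(overlapping) == 0:
--         return [(sleep_start, sleep_end)]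
--
--     overlapping.sort(key=lambda x: x[0])
--
--     # Pass 1: merge overlapping/adjacent bad intervals into disjoint ones.
--     merged = []
--     cur_s, cur_e = overlapping[0]
--     for s, e in overlapping[1:]:
--         if s <= cur_e:
--             cur_e = max(cur_e, e)
--         else:
--             merged.append((cur_s, cur_e))
--             cur_s, cur_e = s, e
--     merged.append((cur_s, cur_e))
--
--     # Pass 2: complement of the merged intervals within the sleep window.
--     result = []
--     cursor = sleep_start
--     for ms, me in merged:
--         if cursor < ms:
--             result.append((cursor, ms))
--         cursor = max(cursor, me)
--     if cursor < sleep_end: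
--         result.append((cursor, sleep_end))
--     return result
-- ===== Notes on version B (the rewrite author's own statement) =====
-- stated objective: alternative
-- what changed: Replaces the single max()-absorbing sweep over the sorted bads by two separate passes: first merging overlapping/adjacent bad intervals into a disjoint sorted list, then emitting the complement of that merged list inside the sleep window.
import Mathlib
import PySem

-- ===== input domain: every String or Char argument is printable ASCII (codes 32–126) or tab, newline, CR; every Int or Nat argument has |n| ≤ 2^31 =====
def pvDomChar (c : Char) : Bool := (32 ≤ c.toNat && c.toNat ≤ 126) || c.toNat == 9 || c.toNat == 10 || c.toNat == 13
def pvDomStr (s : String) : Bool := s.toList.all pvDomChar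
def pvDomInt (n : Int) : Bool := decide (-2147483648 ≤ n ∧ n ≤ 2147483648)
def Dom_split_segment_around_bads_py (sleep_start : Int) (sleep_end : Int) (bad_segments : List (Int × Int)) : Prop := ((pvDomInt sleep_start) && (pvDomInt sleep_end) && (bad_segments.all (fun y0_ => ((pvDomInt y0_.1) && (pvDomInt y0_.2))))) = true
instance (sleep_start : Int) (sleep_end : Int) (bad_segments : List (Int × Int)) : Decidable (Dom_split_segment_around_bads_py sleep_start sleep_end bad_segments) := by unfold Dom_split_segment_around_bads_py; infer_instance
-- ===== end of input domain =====

-- B replaces A's single max()-absorbing sweep by two passes (merge the sorted bads into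
-- disjoint intervals, then take the complement inside the window); same cost, different decomposition.

-- ===== PORT A =====
-- A's sweep loop: state (valid_segments, current_pos)
def pvSweepA (cur : Int) (acc : List (Int × Int)) : List (Int × Int) → List (Int × Int) × Int
  | [] => (acc, cur)
  | (s, e) :: rest => pvSweepA (max cur e) (if cur < s then acc ++ [(cur, s)] else acc) rest

def split_segment_around_bads_py (sleep_start : Int) (sleep_end : Int) (bad_segments : List (Int × Int)) : List (Int × Int) :=
  if bad_segments.length = 0 then [(sleep_start, sleep_end)]
  else
    let overlapping := bad_segments.foldl
      (fun acc p => if ¬(p.2 ≤ sleep_start ∨ p.1 ≥ sleep_end) then acc ++ [p] else acc)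
      ([] : List (Int × Int))
    if overlapping.length = 0 then [(sleep_start, sleep_end)]
    else
      let sortedBads := PySem.List.sorted overlapping (fun x => x.1)
      let r := pvSweepA sleep_start [] sortedBads
      if r.2 < sleep_end then r.1 ++ [(r.2, sleep_end)] else r.1

-- ===== PORT B =====
-- B's pass 1: merge overlapping/adjacent bads; state (cur_s, cur_e, merged)
def pvMergeB (cs ce : Int) (acc : List (Int × Int)) : List (Int × Int) → List (Int × Int)
  | [] => acc ++ [(cs, ce)]
  | (s, e) :: rest =>
      if s ≤ ce then pvMergeB cs (max ce e) acc rest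
      else pvMergeB s e (acc ++ [(cs, ce)]) rest

-- B's pass 2: complement of the merged list; state (result, cursor)
def pvCompB (cursor : Int) (res : List (Int × Int)) : List (Int × Int) → List (Int × Int) × Int
  | [] => (res, cursor)
  | (ms, me) :: rest => pvCompB (max cursor me) (if cursor < ms then res ++ [(cursor, ms)] else res) rest

def split_segment_around_bads_py_alt (sleep_start : Int) (sleep_end : Int) (bad_segments : List (Int × Int)) : List (Int × Int) :=
  if bad_segments.length = 0 then [(sleep_start, sleep_end)]
  else
    let overlapping := bad_segments.filter (fun p => decide (¬(p.2 ≤ sleep_start ∨ p.1 ≥ sleep_end)))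
    if overlapping.length = 0 then [(sleep_start, sleep_end)]
    else
      match PySem.List.sorted overlapping (fun x => x.1) with
      | [] => []  -- unreachable: overlapping is nonempty, sorted preserves length
      | (s0, e0) :: rest =>
        let merged := pvMergeB s0 e0 [] rest
        let r := pvCompB sleep_start [] merged
        if r.2 < sleep_end then r.1 ++ [(r.2, sleep_end)] else r.1

-- ===== PRECONDITION & SPEC =====
def Spec_split_segment_around_bads_py (sleep_start : Int) (sleep_end : Int) (bad_segments : List (Int × Int)) (out : List (Int × Int)) : Prop := out = split_segment_around_bads_py_alt sleep_start sleep_end bad_segments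
instance (sleep_start : Int) (sleep_end : Int) (bad_segments : List (Int × Int)) (out : List (Int × Int)) : Decidable (Spec_split_segment_around_bads_py sleep_start sleep_end bad_segments out) := by unfold Spec_split_segment_around_bads_py; infer_instance

-- ===== CLAIM (what is proved, stated in full; the proofs are below) =====
def Claim_equal_split_segment_around_bads_py : Prop := ∀ (sleep_start : Int) (sleep_end : Int) (bad_segments : List (Int × Int)), Dom_split_segment_around_bads_py sleep_start sleep_end bad_segments → Spec_split_segment_around_bads_py sleep_start sleep_end bad_segments (split_segment_around_bads_py sleep_start sleep_end bad_segments)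

-- ===== LEMMAS AND PROOFS =====

-- B's complement loop has the same recursion as A's sweep loop.
theorem pvCompB_eq_pvSweepA (l : List (Int × Int)) : ∀ (cur : Int) (acc : List (Int × Int)),
    pvCompB cur acc l = pvSweepA cur acc l := by
  induction l with
  | nil => intro cur acc; rfl
  | cons p rest ih => intro cur acc; cases p; simp [pvCompB, pvSweepA, ih]

theorem pvMergeB_acc (l : List (Int × Int)) : ∀ (cs ce : Int) (acc : List (Int × Int)),
    pvMergeB cs ce acc l = acc ++ pvMergeB cs ce [] l := by
  induction l with
  | nil => intro cs ce acc; simp [pvMergeB]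
  | cons p rest ih =>
    intro cs ce acc; cases p with
    | mk s e =>
      by_cases h : s ≤ ce
      · simp only [pvMergeB, if_pos h]
        exact ih cs (max ce e) acc
      · simp only [pvMergeB, if_neg h, List.nil_append]
        rw [ih s e (acc ++ [(cs, ce)]), ih s e [(cs, ce)]]
        simp

-- Sweeping the merged intervals is the same as sweeping the sorted bads.
theorem pvSweepA_merge (l : List (Int × Int)) : ∀ (cs ce cur : Int) (acc : List (Int × Int)),
    ((cs, ce) :: l).Pairwise (fun a b => a.1 ≤ b.1) →
    pvSweepA cur acc (pvMergeB cs ce [] l) = pvSweepA cur acc ((cs, ce) :: l) := by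
  induction l with
  | nil => intro cs ce cur acc _; rfl
  | cons p rest ih =>
    intro cs ce cur acc hp; cases p with
    | mk s e =>
      have hcs_s : cs ≤ s := (List.pairwise_cons.mp hp).1 (s, e) (List.mem_cons_self)
      have hcs_rest : ∀ q ∈ rest, cs ≤ q.1 := fun q hq =>
        (List.pairwise_cons.mp hp).1 q (List.mem_cons_of_mem _ hq)
      have hrest : ((s, e) :: rest).Pairwise (fun a b => a.1 ≤ b.1) :=
        (List.pairwise_cons.mp hp).2
      by_cases h : s ≤ ce
      · simp only [pvMergeB, if_pos h]
        have hp' : ((cs, max ce e) :: rest).Pairwise (fun a b => a.1 ≤ b.1) := by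
          refine List.pairwise_cons.mpr ⟨hcs_rest, (List.pairwise_cons.mp hrest).2⟩
        rw [ih cs (max ce e) cur acc hp']
        show pvSweepA (max cur (max ce e)) (if cur < cs then acc ++ [(cur, cs)] else acc) rest
           = pvSweepA cur acc ((cs, ce) :: (s, e) :: rest)
        have hnot : ¬ (max cur ce < s) := by
          have : s ≤ max cur ce := le_trans h (le_max_right _ _)
          omega
        simp only [pvSweepA, if_neg hnot]
        rw [max_assoc]
      · simp only [pvMergeB, if_neg h]
        rw [pvMergeB_acc]
        show pvSweepA cur acc ((cs, ce) :: pvMergeB s e [] rest)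
           = pvSweepA cur acc ((cs, ce) :: (s, e) :: rest)
        simp only [pvSweepA]
        exact ih s e _ _ hrest

theorem split_segment_around_bads_py_eq (sleep_start sleep_end : Int) (bad_segments : List (Int × Int)) :
    split_segment_around_bads_py sleep_start sleep_end bad_segments
      = split_segment_around_bads_py_alt sleep_start sleep_end bad_segments := by
  unfold split_segment_around_bads_py split_segment_around_bads_py_alt
  by_cases h0 : bad_segments.length = 0
  · simp [h0]
  · simp only [if_neg h0]
    have hfold : bad_segments.foldl
        (fun acc p => if ¬(p.2 ≤ sleep_start ∨ p.1 ≥ sleep_end) then acc ++ [p] else acc)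
        ([] : List (Int × Int))
      = bad_segments.filter (fun p => decide (¬(p.2 ≤ sleep_start ∨ p.1 ≥ sleep_end))) := by
      rw [PySem.List.foldl_append_ite_eq_filter]
      simp
    rw [hfold]
    set ov := bad_segments.filter (fun p => decide (¬(p.2 ≤ sleep_start ∨ p.1 ≥ sleep_end))) with hov
    by_cases h1 : ov.length = 0
    · simp [h1]
    · simp only [if_neg h1]
      have hne : PySem.List.sorted ov (fun x => x.1) ≠ [] := by
        intro hnil
        rw [PySem.List.sorted_eq_nil_iff] at hnil
        exact h1 (by rw [hnil]; rfl)
      obtain ⟨p0, rest, hs⟩ := List.exists_cons_of_ne_nil hne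
      obtain ⟨s0, e0⟩ := p0
      have hpw : ((s0, e0) :: rest).Pairwise (fun a b => a.1 ≤ b.1) := by
        have := PySem.List.sorted_pairwise (xs := ov) (key := fun x => x.1)
        rw [hs] at this
        exact this
      rw [hs]
      simp only []
      rw [pvCompB_eq_pvSweepA, pvSweepA_merge rest s0 e0 sleep_start [] hpw]

-- ===== VERDICT (by name: the statement is the Claim_ definition above) =====
theorem split_segment_around_bads_py_spec : Claim_equal_split_segment_around_bads_py := by
  intro ss se bads _
  unfold Spec_split_segment_around_bads_py
  exact split_segment_around_bads_py_eq ss se bads
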